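-- pv_equiv track=rewrite | github.com/smejkyz/2023_aoc | day_09.py | compute_total_history
-- ===== SOURCE A (Python) =====
-- def compute_total_history(_history: list[int]) -> list[list[int]]:
--     current_values = _history
--     _total_history = [_history]
--     while not all(item == 0 for item in current_values):
--         # compute diffs
--         new_values = [item_2 - item_1 for item_1, item_2 in zip(current_values, current_values[1:])]
--         _total_history.append(new_values)
--         current_values = _total_history[-1]
--         pass
--     return _total_history
-- ===== SOURCE B (Python) =====
-- def compute_total_history(_history: list[int]) -> list[list[int]]:
--     if all(item == 0 for item in _history):
--         return [_history]
--     diffs = [b - a for a, b in zip(_history, _history[1:])]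
--     return [_history] + compute_total_history(diffs)
-- ===== Notes on version B (the rewrite author's own statement) =====
-- stated objective: simpler
-- what changed: Replaced the while-loop with mutable accumulator/append by a direct structural recursion: base case when all items are zero, otherwise prepend the level and recurse on the differences.
import Mathlib
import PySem

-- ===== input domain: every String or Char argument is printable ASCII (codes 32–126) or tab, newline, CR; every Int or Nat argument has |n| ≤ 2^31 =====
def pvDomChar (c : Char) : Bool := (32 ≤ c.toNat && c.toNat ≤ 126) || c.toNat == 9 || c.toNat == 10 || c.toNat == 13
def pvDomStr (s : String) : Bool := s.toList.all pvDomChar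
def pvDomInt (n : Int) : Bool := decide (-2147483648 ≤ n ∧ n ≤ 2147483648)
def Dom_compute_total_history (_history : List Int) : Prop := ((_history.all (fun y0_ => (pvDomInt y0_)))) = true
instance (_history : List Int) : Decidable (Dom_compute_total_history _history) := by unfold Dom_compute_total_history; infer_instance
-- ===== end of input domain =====

-- B replaces A's while-loop with mutable append-accumulation by a direct structural
-- recursion on the difference pyramid (objective: simpler decomposition, same cost).

-- ===== PORT A =====
-- `[item_2 - item_1 for item_1, item_2 in zip(current_values, current_values[1:])]`
def pvDiffsA (l : List Int) : List Int :=
  (l.zip (PySem.List.slice l (some 1) none)).map (fun p => p.2 - p.1)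

theorem pvDiffsA_len_lt (l : List Int) (h : l ≠ []) : (pvDiffsA l).length < l.length := by
  cases l with
  | nil => exact absurd rfl h
  | cons a t =>
    simp [pvDiffsA, PySem.List.slice_from_one, List.length_zip]

-- the while-loop, with loop state (current_values, _total_history)
def pvLoopA (current : List Int) (acc : List (List Int)) : List (List Int) :=
  if current.all (fun item => item == 0) then acc
  else
    let new_values := pvDiffsA current
    pvLoopA new_values (acc ++ [new_values])
termination_by current.length
decreasing_by
  exact pvDiffsA_len_lt current (by rintro rfl; simp at *)

def compute_total_history (_history : List Int) : List (List Int) :=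
  pvLoopA _history [_history]

-- ===== PORT B =====
def pvDiffsB (l : List Int) : List Int :=
  (l.zip (PySem.List.slice l (some 1) none)).map (fun p => p.2 - p.1)

theorem pvDiffsB_len_lt (l : List Int) (h : l ≠ []) : (pvDiffsB l).length < l.length :=
  pvDiffsA_len_lt l h

def compute_total_history_alt (_history : List Int) : List (List Int) :=
  if _history.all (fun item => item == 0) then [_history]
  else _history :: compute_total_history_alt (pvDiffsB _history)
termination_by _history.length
decreasing_by
  exact pvDiffsB_len_lt _history (by rintro rfl; simp at *)

-- ===== PRECONDITION & SPEC =====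
def Spec_compute_total_history (_history : List Int) (out : List (List Int)) : Prop := out = compute_total_history_alt _history
instance (_history : List Int) (out : List (List Int)) : Decidable (Spec_compute_total_history _history out) := by unfold Spec_compute_total_history; infer_instance

-- ===== CLAIM (what is proved, stated in full; the proofs are below) =====
def Claim_equal_compute_total_history : Prop := ∀ (_history : List Int), Dom_compute_total_history _history → Spec_compute_total_history _history (compute_total_history _history)

-- ===== LEMMAS AND PROOFS =====

theorem alt_unfold (c : List Int) :
    compute_total_history_alt c = c :: (compute_total_history_alt c).tail := by
  rw [compute_total_history_alt]
  split <;> simp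

theorem pvLoopA_eq_append (c : List Int) (acc : List (List Int)) :
    pvLoopA c acc = acc ++ (compute_total_history_alt c).tail := by
  induction c, acc using pvLoopA.induct with
  | case1 c acc hz =>
      rw [pvLoopA, compute_total_history_alt]
      simp [hz]
  | case2 c acc hz nv ih =>
      rw [pvLoopA, compute_total_history_alt]
      simp only [hz, Bool.false_eq_true, if_false]
      rw [ih]
      simp only [nv, pvDiffsA, pvDiffsB, List.append_assoc, List.singleton_append]
      exact congrArg (acc ++ ·) (alt_unfold _).symm

-- ===== VERDICT (by name: the statement is the Claim_ definition above) =====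
theorem compute_total_history_spec : Claim_equal_compute_total_history := by
  intro h _
  unfold Spec_compute_total_history compute_total_history
  rw [pvLoopA_eq_append, alt_unfold h]
  rfl
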